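-- pv_equiv track=rewrite | github.com/sunitashrma/NPTEL_PythonAssignments | sumCubes.py | sum3cubes
-- ===== SOURCE A (Python) =====
-- def sum3cubes(n):
--   sum=0
--   for i in range(1,n):
--     for j in range(1,n):
--       for k in range(1,n):
--         if (i*i*i+j*j*j+k*k*k) == n:
--           sum+=1
--   if sum>=1:
--     return True
--   else:
--     return False
-- ===== SOURCE B (Python) =====
-- def sum3cubes(n):
--     # integer cube root of n (0 when n < 1), by counting up
--     c = 0
--     while (c + 1) ** 3 <= n:
--         c += 1
--     cubes = {t ** 3 for t in range(1, c + 1)}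
--     return any(n - i ** 3 - j ** 3 in cubes
--                for i in range(1, c + 1) for j in range(1, c + 1))
-- ===== Notes on version B (the rewrite author's own statement) =====
-- stated objective: faster
-- what changed: Replaces the O(n^3) triple loop over range(1,n) with two loops up to the integer cube root of n plus a precomputed set of cubes membership test for the third summand.
import Mathlib
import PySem

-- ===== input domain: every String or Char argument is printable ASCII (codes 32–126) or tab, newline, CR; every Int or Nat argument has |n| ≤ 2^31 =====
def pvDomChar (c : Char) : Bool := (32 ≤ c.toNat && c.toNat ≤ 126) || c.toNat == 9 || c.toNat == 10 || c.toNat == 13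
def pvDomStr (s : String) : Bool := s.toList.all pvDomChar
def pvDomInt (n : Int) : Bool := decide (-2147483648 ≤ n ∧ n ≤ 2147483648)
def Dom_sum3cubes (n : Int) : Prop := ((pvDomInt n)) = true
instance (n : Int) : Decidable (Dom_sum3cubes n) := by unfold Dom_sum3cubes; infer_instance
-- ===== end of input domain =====

-- B replaces A's O(n^3) triple scan by two loops up to the integer cube root plus a
-- precomputed set of cubes for the third summand (objective: faster, asymptotic).


-- ===== PORT A =====
-- triple nested loop over range(1, n), counting solutions; returns sum >= 1
def sum3cubes (n : Int) : Bool :=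
  let sum : Int :=
    (PySem.List.pyRange 1 n 1).foldl (fun s i =>
      (PySem.List.pyRange 1 n 1).foldl (fun s j =>
        (PySem.List.pyRange 1 n 1).foldl (fun s k =>
          if i * i * i + j * j * j + k * k * k = n then s + 1 else s) s) s) 0
  if sum ≥ 1 then true else false

-- ===== PORT B =====
-- the 'while (c+1)**3 <= n: c += 1' loop of Source B
def icbrtLoop (n : Int) (c : Nat) : Nat :=
  if h : ((c : Int) + 1) ^ 3 ≤ n then icbrtLoop n (c + 1) else c
termination_by (n.toNat + 1) - c
decreasing_by
  have h1 : (c : Int) + 1 ≤ ((c : Int) + 1) ^ 3 := by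
    nlinarith [pow_nonneg (Int.natCast_nonneg c) 3, sq_nonneg ((c : Int))]
  have h2 : (c : Int) + 1 ≤ n := le_trans h1 h
  omega

def sum3cubes_alt (n : Int) : Bool :=
  let c : Int := (icbrtLoop n 0 : Int)
  let cubes : PySem.Set Int :=
    PySem.Set.ofList ((PySem.List.pyRange 1 (c + 1) 1).map (fun t => t ^ 3))
  (PySem.List.pyRange 1 (c + 1) 1).any (fun i =>
    (PySem.List.pyRange 1 (c + 1) 1).any (fun j =>
      PySem.Set.contains cubes (n - i ^ 3 - j ^ 3)))

-- ===== PRECONDITION & SPEC =====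
def Spec_sum3cubes (n : Int) (out : Bool) : Prop := out = sum3cubes_alt n
instance (n : Int) (out : Bool) : Decidable (Spec_sum3cubes n out) := by unfold Spec_sum3cubes; infer_instance

-- ===== CLAIM (what is proved, stated in full; the proofs are below) =====
def Claim_equal_sum3cubes : Prop := ∀ (n : Int), Dom_sum3cubes n → Spec_sum3cubes n (sum3cubes n)

-- ===== LEMMAS AND PROOFS =====

-- cubes are monotone on positives
lemma cube_mono {a b : Int} (ha : 1 ≤ a) (hab : a ≤ b) : a ^ 3 ≤ b ^ 3 :=
  pow_le_pow_left₀ (by omega) hab 3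

-- the exit condition of icbrtLoop
lemma icbrtLoop_exit (n : Int) (c : Nat) : ¬ (((icbrtLoop n c : Nat) : Int) + 1) ^ 3 ≤ n := by
  fun_induction icbrtLoop n c with
  | case1 c h ih => exact ih
  | case2 c h => exact h

-- the invariant of icbrtLoop: the result is the start or has cube ≤ n
lemma icbrtLoop_inv (n : Int) (c : Nat) :
    icbrtLoop n c = c ∨ ((icbrtLoop n c : Nat) : Int) ^ 3 ≤ n := by
  fun_induction icbrtLoop n c with
  | case1 c h ih =>
    rcases ih with he | hle
    · right; rw [he]; push_cast; exact h
    · right; exact hle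
  | case2 c h => left; rfl

-- characterization: for t ≥ 1, t³ ≤ n ↔ t ≤ icbrt n
lemma cube_le_iff (n t : Int) (ht : 1 ≤ t) :
    t ^ 3 ≤ n ↔ t ≤ ((icbrtLoop n 0 : Nat) : Int) := by
  set c : Int := ((icbrtLoop n 0 : Nat) : Int) with hc
  have hc0 : 0 ≤ c := by positivity
  have hexit : ¬ (c + 1) ^ 3 ≤ n := icbrtLoop_exit n 0
  constructor
  · intro h
    by_contra hgt
    push Not at hgt
    have : c + 1 ≤ t := by omega
    exact hexit (le_trans (cube_mono (by omega) this) h)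
  · intro h
    rcases icbrtLoop_inv n 0 with he | hle
    · rw [he] at hc; simp [hc] at h; omega
    · exact le_trans (cube_mono ht h) hle

-- sum of pointwise-nonnegative values is positive iff some value is positive
lemma sum_map_pos_iff {α : Type} (l : List α) (g : α → Int) (hg : ∀ x, 0 ≤ g x) :
    0 < (l.map g).sum ↔ ∃ x ∈ l, 0 < g x := by
  induction l with
  | nil => simp
  | cons x xs ih =>
    simp only [List.map_cons, List.sum_cons, List.mem_cons]
    constructor
    · intro h
      by_cases hx : 0 < g x
      · exact ⟨x, Or.inl rfl, hx⟩
      · have : 0 < (xs.map g).sum := by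
          have := hg x; omega
        obtain ⟨y, hy, hgy⟩ := ih.mp this
        exact ⟨y, Or.inr hy, hgy⟩
    · rintro ⟨y, hy | hy, hgy⟩
      · have hs : 0 ≤ (xs.map g).sum := List.sum_nonneg (by
          intro z hz; obtain ⟨w, _, rfl⟩ := List.mem_map.mp hz; exact hg w)
        subst hy; omega
      · have := hg x
        have : 0 < (xs.map g).sum := ih.mpr ⟨y, hy, hgy⟩
        omega

-- A returns true iff a triple in [1,n)³ sums in cubes to n
lemma sum3cubes_true_iff (n : Int) :
    sum3cubes n = true ↔
      ∃ i ∈ PySem.List.pyRange 1 n 1, ∃ j ∈ PySem.List.pyRange 1 n 1,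
        ∃ k ∈ PySem.List.pyRange 1 n 1, i * i * i + j * j * j + k * k * k = n := by
  unfold sum3cubes
  set R := PySem.List.pyRange 1 n 1 with hR
  have inner : ∀ (i j : Int) (s : Int),
      R.foldl (fun s k => if i * i * i + j * j * j + k * k * k = n then s + 1 else s) s
        = s + ((R.countP (fun k => decide (i * i * i + j * j * j + k * k * k = n)) : Nat) : Int) := by
    intro i j s
    exact PySem.List.foldl_ite_add_one (fun k => i * i * i + j * j * j + k * k * k = n) R s
  have middle : ∀ (i : Int) (s : Int),
      R.foldl (fun s j =>
        R.foldl (fun s k => if i * i * i + j * j * j + k * k * k = n then s + 1 else s) s) s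
        = s + (R.map (fun j => ((R.countP (fun k => decide (i * i * i + j * j * j + k * k * k = n)) : Nat) : Int))).sum := by
    intro i s
    rw [show (fun s j => R.foldl (fun s k => if i * i * i + j * j * j + k * k * k = n then s + 1 else s) s)
          = (fun s j => s + ((R.countP (fun k => decide (i * i * i + j * j * j + k * k * k = n)) : Nat) : Int)) from
        funext fun s => funext fun j => inner i j s]
    exact PySem.List.foldl_add R _ s
  have gdef : ∀ i : Int,
      (R.map (fun j => ((R.countP (fun k => decide (i * i * i + j * j * j + k * k * k = n)) : Nat) : Int))).sum
        = (fun i => (R.map (fun j => ((R.countP (fun k => decide (i * i * i + j * j * j + k * k * k = n)) : Nat) : Int))).sum) i := fun _ => rfl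
  have outer :
      R.foldl (fun s i => R.foldl (fun s j =>
        R.foldl (fun s k => if i * i * i + j * j * j + k * k * k = n then s + 1 else s) s) s) 0
        = 0 + (R.map (fun i => (R.map (fun j => ((R.countP (fun k => decide (i * i * i + j * j * j + k * k * k = n)) : Nat) : Int))).sum)).sum := by
    rw [show (fun s i => R.foldl (fun s j =>
          R.foldl (fun s k => if i * i * i + j * j * j + k * k * k = n then s + 1 else s) s) s)
          = (fun s i => s + (R.map (fun j => ((R.countP (fun k => decide (i * i * i + j * j * j + k * k * k = n)) : Nat) : Int))).sum) from
        funext fun s => funext fun i => middle i s]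
    exact PySem.List.foldl_add R _ 0
  simp only [outer, zero_add]
  have hnn1 : ∀ i : Int, 0 ≤ (R.map (fun j => ((R.countP (fun k => decide (i * i * i + j * j * j + k * k * k = n)) : Nat) : Int))).sum := by
    intro i
    apply List.sum_nonneg
    intro z hz; obtain ⟨w, _, rfl⟩ := List.mem_map.mp hz; positivity
  constructor
  · intro h
    have hpos : 0 < (R.map (fun i => (R.map (fun j => ((R.countP (fun k => decide (i * i * i + j * j * j + k * k * k = n)) : Nat) : Int))).sum)).sum := by
      by_contra hnp
      simp only [if_neg (by omega :
        ¬ (R.map (fun i => (R.map (fun j => ((R.countP (fun k => decide (i * i * i + j * j * j + k * k * k = n)) : Nat) : Int))).sum)).sum ≥ 1)] at h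
      · exact Bool.false_ne_true h
    obtain ⟨i, hi, hipos⟩ := (sum_map_pos_iff R _ hnn1).mp hpos
    obtain ⟨j, hj, hjpos⟩ := (sum_map_pos_iff R _ (by intro x; positivity)).mp hipos
    have hcnt : 0 < R.countP (fun k => decide (i * i * i + j * j * j + k * k * k = n)) := by
      exact_mod_cast hjpos
    obtain ⟨k, hk, hkp⟩ := List.countP_pos_iff.mp hcnt
    exact ⟨i, hi, j, hj, k, hk, of_decide_eq_true hkp⟩
  · rintro ⟨i, hi, j, hj, k, hk, heq⟩
    have hcnt : 0 < R.countP (fun k => decide (i * i * i + j * j * j + k * k * k = n)) :=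
      List.countP_pos_iff.mpr ⟨k, hk, decide_eq_true heq⟩
    have hpos : 0 < (R.map (fun i => (R.map (fun j => ((R.countP (fun k => decide (i * i * i + j * j * j + k * k * k = n)) : Nat) : Int))).sum)).sum := by
      apply (sum_map_pos_iff R _ hnn1).mpr
      refine ⟨i, hi, ?_⟩
      apply (sum_map_pos_iff R _ (by intro x; positivity)).mpr
      exact ⟨j, hj, by exact_mod_cast hcnt⟩
    rw [if_pos (by omega)]

-- B returns true iff i,j ≤ icbrt n and n - i³ - j³ is the cube of some t in [1, icbrt n]
lemma sum3cubes_alt_true_iff (n : Int) :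
    sum3cubes_alt n = true ↔
      ∃ i ∈ PySem.List.pyRange 1 (((icbrtLoop n 0 : Nat) : Int) + 1) 1,
        ∃ j ∈ PySem.List.pyRange 1 (((icbrtLoop n 0 : Nat) : Int) + 1) 1,
          ∃ t ∈ PySem.List.pyRange 1 (((icbrtLoop n 0 : Nat) : Int) + 1) 1,
            t ^ 3 = n - i ^ 3 - j ^ 3 := by
  unfold sum3cubes_alt
  simp only [List.any_eq_true, PySem.Set.contains_iff, PySem.Set.mem_ofList, List.mem_map]

-- ===== VERDICT (by name: the statement is the Claim_ definition above) =====
theorem sum3cubes_spec : Claim_equal_sum3cubes := by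
  intro n _
  unfold Spec_sum3cubes
  rw [Bool.eq_iff_iff, sum3cubes_true_iff, sum3cubes_alt_true_iff]
  set c : Int := ((icbrtLoop n 0 : Nat) : Int) with hc
  have hc0 : 0 ≤ c := by positivity
  constructor
  · rintro ⟨i, hi, j, hj, k, hk, heq⟩
    rw [PySem.List.mem_pyRange_one] at hi hj hk
    have ei : i ^ 3 = i * i * i := by ring
    have ej : j ^ 3 = j * j * j := by ring
    have ek : k ^ 3 = k * k * k := by ring
    have li : 1 ≤ i * i * i := by nlinarith [hi.1]
    have lj : 1 ≤ j * j * j := by nlinarith [hj.1]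
    have lk : 1 ≤ k * k * k := by nlinarith [hk.1]
    have hib := (cube_le_iff n i hi.1).mp (by omega)
    have hjb := (cube_le_iff n j hj.1).mp (by omega)
    have hkb := (cube_le_iff n k hk.1).mp (by omega)
    refine ⟨i, ?_, j, ?_, k, ?_, by omega⟩
    · rw [PySem.List.mem_pyRange_one]; omega
    · rw [PySem.List.mem_pyRange_one]; omega
    · rw [PySem.List.mem_pyRange_one]; omega
  · rintro ⟨i, hi, j, hj, t, ht, hteq⟩
    rw [PySem.List.mem_pyRange_one] at hi hj ht
    have ei : i ^ 3 = i * i * i := by ring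
    have ej : j ^ 3 = j * j * j := by ring
    have et : t ^ 3 = t * t * t := by ring
    have li : 1 ≤ i * i * i := by nlinarith [hi.1]
    have lj : 1 ≤ j * j * j := by nlinarith [hj.1]
    have lt' : 1 ≤ t * t * t := by nlinarith [ht.1]
    have hn3 : 3 ≤ n := by omega
    have hcn : c < n := by
      have hc1 : 1 ≤ c := by omega
      rcases icbrtLoop_inv n 0 with he | hle
      · rw [he] at hc; simp at hc; omega
      · rw [← hc] at hle
        by_contra hnc
        have h3c : 3 ≤ c := by omega
        have hcc : c ^ 3 ≤ c := by omega
        nlinarith [sq_nonneg c]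
    refine ⟨i, ?_, j, ?_, t, ?_, by omega⟩
    · rw [PySem.List.mem_pyRange_one]; omega
    · rw [PySem.List.mem_pyRange_one]; omega
    · rw [PySem.List.mem_pyRange_one]; omega
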